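-- pv_equiv track=rewrite | github.com/martylee/Python | CSC410-Project-1-master/check_ins/check_in2.py | find_last_stmt
-- ===== SOURCE A (Python) =====
-- def find_last_stmt(line,stlist):
-- 	last = 0
-- 	stmt = ''
-- 	for i in stlist:
-- 		if line > i[0] > last:
-- 			last = i[0]
-- 			stmt = i[1]
-- 	return stmt
-- ===== SOURCE B (Python) =====
-- def find_last_stmt(line, stlist):
--     cands = sorted((p for p in stlist if 0 < p[0] < line),
--                    key=lambda p: p[0], reverse=True)
--     return cands[0][1] if cands else ''
-- ===== Notes on version B (the rewrite author's own statement) =====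
-- stated objective: alternative
-- what changed: A's single-pass running-max with threaded (last, stmt) state is replaced by a sort-based selection: filter the candidates with 0 < key < line, stably sort them by key in descending order, and return the head's statement (stability of Python's sort preserves A's first-occurrence tie-breaking).
import Mathlib
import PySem

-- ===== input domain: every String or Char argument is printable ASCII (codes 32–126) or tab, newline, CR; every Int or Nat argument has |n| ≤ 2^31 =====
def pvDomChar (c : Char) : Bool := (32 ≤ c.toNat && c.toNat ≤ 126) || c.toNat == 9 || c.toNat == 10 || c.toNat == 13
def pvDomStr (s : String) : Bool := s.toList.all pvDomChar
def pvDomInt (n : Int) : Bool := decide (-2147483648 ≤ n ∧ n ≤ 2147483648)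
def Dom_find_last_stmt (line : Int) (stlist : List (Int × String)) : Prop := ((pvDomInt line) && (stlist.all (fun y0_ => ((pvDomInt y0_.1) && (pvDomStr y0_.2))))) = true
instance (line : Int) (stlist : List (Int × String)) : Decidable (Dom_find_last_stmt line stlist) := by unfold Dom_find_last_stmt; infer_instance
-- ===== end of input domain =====

-- B replaces A's single-pass running-max with a sort-based selection: filter the candidates
-- 0 < key < line, stably sort them by key descending, take the head (objective: alternative).

-- ===== PORT A =====
def find_last_stmt (line : Int) (stlist : List (Int × String)) : String :=
  (stlist.foldl
    (fun (st : Int × String) (i : Int × String) =>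
      if line > i.1 ∧ i.1 > st.1 then (i.1, i.2) else st)
    (0, "")).2

-- ===== PORT B =====
def find_last_stmt_alt (line : Int) (stlist : List (Int × String)) : String :=
  let cands := PySem.List.sorted
    (stlist.filter (fun p => decide (0 < p.1 ∧ p.1 < line)))
    (fun p => p.1) true
  match cands with
  | m :: _ => m.2
  | [] => ""

-- ===== PRECONDITION & SPEC =====
def Spec_find_last_stmt (line : Int) (stlist : List (Int × String)) (out : String) : Prop := out = find_last_stmt_alt line stlist
instance (line : Int) (stlist : List (Int × String)) (out : String) : Decidable (Spec_find_last_stmt line stlist out) := by unfold Spec_find_last_stmt; infer_instance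

-- ===== CLAIM (what is proved, stated in full; the proofs are below) =====
def Claim_equal_find_last_stmt : Prop := ∀ (line : Int) (stlist : List (Int × String)), Dom_find_last_stmt line stlist → Spec_find_last_stmt line stlist (find_last_stmt line stlist)

-- ===== LEMMAS AND PROOFS =====

-- the "first element with maximal key" step (how the head of the stable descending sort evolves)
def pvMStep (acc : Option (Int × String)) (x : Int × String) : Option (Int × String) :=
  match acc with
  | none => some x
  | some m => if m.1 < x.1 then some x else some m

-- head of the stable descending insertion is pvMStep of the old head
theorem pv_head_insertBy (x : Int × String) (acc : List (Int × String)) :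
    (PySem.List.insertBy (fun a b => decide ((b : Int × String).1 < a.1)) x acc).head? =
    pvMStep acc.head? x := by
  cases acc with
  | nil => rfl
  | cons m t =>
    simp only [PySem.List.insertBy, pvMStep]
    by_cases h : m.1 < x.1 <;> simp [h]

-- hence the head of the whole insertion-sort fold is the pvMStep fold of the heads
theorem pv_head_fold (xs : List (Int × String)) :
    ∀ (acc : List (Int × String)),
      (xs.foldl
        (fun acc x => PySem.List.insertBy (fun a b => decide ((b : Int × String).1 < a.1)) x acc)
        acc).head? = xs.foldl pvMStep acc.head? := by
  induction xs with
  | nil => intro acc; rfl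
  | cons x t ih =>
    intro acc
    simp only [List.foldl_cons]
    rw [ih, pv_head_insertBy]

theorem pv_head_sorted_rev (xs : List (Int × String)) :
    (PySem.List.sorted xs (fun p => p.1) true).head? = xs.foldl pvMStep none := by
  rw [PySem.List.sorted_rev_eq_foldl_insertBy]
  exact pv_head_fold xs []

-- selecting the first maximum over a filtered tail, with the lower bound raised to the
-- current accumulator's key
theorem pv_fold_filter (line : Int) :
    ∀ (t : List (Int × String)) (i : Int × String) (b : Int), b < i.1 →
      (t.filter (fun p => decide (b < p.1 ∧ p.1 < line))).foldl pvMStep (some i) =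
      some (match (t.filter (fun p => decide (i.1 < p.1 ∧ p.1 < line))).foldl pvMStep none with
            | none => i
            | some m => m) := by
  intro t
  induction t with
  | nil => intro i b _; simp
  | cons y t ih =>
    intro i b hbi
    by_cases hy : b < y.1 ∧ y.1 < line
    · rw [List.filter_cons_of_pos (by simpa using hy)]
      by_cases hiy : i.1 < y.1
      · rw [List.filter_cons_of_pos (p := fun p : Int × String => decide (i.1 < p.1 ∧ p.1 < line))
            (by simpa using And.intro hiy hy.2)]
        have h1 : pvMStep (some i) y = some y := by simp [pvMStep, hiy]
        have h2 : pvMStep none y = some y := by simp [pvMStep]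
        rw [List.foldl_cons, h1, List.foldl_cons, h2, ih y b hy.1, ih y i.1 hiy]
      · have hy' : ¬ (i.1 < y.1 ∧ y.1 < line) := fun h => hiy h.1
        rw [List.filter_cons_of_neg (p := fun p : Int × String => decide (i.1 < p.1 ∧ p.1 < line))
            (by simpa using hy')]
        have h1 : pvMStep (some i) y = some i := by simp [pvMStep, hiy]
        rw [List.foldl_cons, h1, ih i b hbi]
    · have hy' : ¬ (i.1 < y.1 ∧ y.1 < line) := by
        intro h; exact hy ⟨lt_trans hbi h.1, h.2⟩
      rw [List.filter_cons_of_neg (by simpa using hy),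
          List.filter_cons_of_neg (p := fun p : Int × String => decide (i.1 < p.1 ∧ p.1 < line))
            (by simpa using hy')]
      exact ih i b hbi

-- A's loop, from an arbitrary state (b, s), computes the first-maximum selection over the
-- candidates with lower bound b
theorem pv_loop_eq (line : Int) :
    ∀ (l : List (Int × String)) (b : Int) (s : String),
      (l.foldl
        (fun (st : Int × String) (i : Int × String) =>
          if line > i.1 ∧ i.1 > st.1 then (i.1, i.2) else st)
        (b, s)).2 =
      (match (l.filter (fun p => decide (b < p.1 ∧ p.1 < line))).foldl pvMStep none with
       | none => s
       | some m => m.2) := by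
  intro l
  induction l with
  | nil => intro b s; simp
  | cons i t ih =>
    intro b s
    by_cases hc : b < i.1 ∧ i.1 < line
    · have hc' : line > i.1 ∧ i.1 > b := ⟨hc.2, hc.1⟩
      rw [List.filter_cons_of_pos (by simpa using hc)]
      have h2 : pvMStep none i = some i := by simp [pvMStep]
      simp only [List.foldl_cons]
      rw [if_pos hc', h2, pv_fold_filter line t i b hc.1, ih i.1 i.2]
      cases (t.filter (fun p => decide (i.1 < p.1 ∧ p.1 < line))).foldl pvMStep none with
      | none => rfl
      | some m => rfl
    · have hc' : ¬ (line > i.1 ∧ i.1 > b) := fun h => hc ⟨h.2, h.1⟩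
      rw [List.filter_cons_of_neg (by simpa using hc), List.foldl_cons, if_neg hc']
      exact ih b s

-- ===== VERDICT (by name: the statement is the Claim_ definition above) =====
theorem find_last_stmt_spec : Claim_equal_find_last_stmt := by
  intro line stlist _
  unfold Spec_find_last_stmt find_last_stmt find_last_stmt_alt
  rw [pv_loop_eq line stlist 0 ""]
  have hh := pv_head_sorted_rev (stlist.filter (fun p => decide (0 < p.1 ∧ p.1 < line)))
  cases hs : PySem.List.sorted (stlist.filter (fun p => decide (0 < p.1 ∧ p.1 < line)))
      (fun p => p.1) true with
  | nil => rw [hs] at hh; simp only [List.head?] at hh; rw [← hh]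
  | cons m t => rw [hs] at hh; simp only [List.head?] at hh; rw [← hh]
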